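-- pv_equiv track=rewrite | github.com/logston/plottags | v1/plot-tags.py | resize_version_tuple
-- ===== SOURCE A (Python) =====
-- def list_get(list_, index, default=None):
--     try:
--         return list_[index]
--     except IndexError:
--         return default
--
-- def resize_version_tuple(version_tuple, min_max_list):
--     part_list = []
--     len_min_max_list = len(min_max_list)
--     for i in range(len_min_max_list):
--         min_, max_ = min_max_list[i]
--         part = list_get(version_tuple, i, min_)
--         part_list.append(part)
--
--     return tuple(part_list)
-- ===== SOURCE B (Python) =====
-- def resize_version_tuple(version_tuple, min_max_list):
--     mins = [min_ for min_, max_ in min_max_list]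
--     return tuple(list(version_tuple[:len(mins)]) + mins[len(version_tuple):])
-- ===== Notes on version B (the rewrite author's own statement) =====
-- stated objective: simpler
-- what changed: Replaced the per-index loop with its try/except list_get lookup by building the mins table once and concatenating a slice of version_tuple with the tail of mins.
import Mathlib
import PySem

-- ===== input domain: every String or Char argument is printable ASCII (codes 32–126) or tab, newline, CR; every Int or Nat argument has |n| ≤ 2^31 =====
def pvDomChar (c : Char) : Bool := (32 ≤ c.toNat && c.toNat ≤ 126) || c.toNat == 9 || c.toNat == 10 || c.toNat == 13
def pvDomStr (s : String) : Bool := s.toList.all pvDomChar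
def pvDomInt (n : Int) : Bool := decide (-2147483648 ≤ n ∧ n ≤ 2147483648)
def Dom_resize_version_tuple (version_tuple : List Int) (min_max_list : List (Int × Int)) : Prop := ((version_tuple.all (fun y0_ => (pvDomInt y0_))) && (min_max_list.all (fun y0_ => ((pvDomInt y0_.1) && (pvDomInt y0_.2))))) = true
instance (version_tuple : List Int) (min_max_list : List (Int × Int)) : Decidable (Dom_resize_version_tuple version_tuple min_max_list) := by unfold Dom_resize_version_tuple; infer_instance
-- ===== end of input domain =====

-- B replaces A's per-index try/except lookup loop by a mins table plus slice/concat; objective: simpler.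

-- ===== PORT A =====
-- list_get(list_, index, default): list_[index], default on IndexError
def list_get (list_ : List Int) (index : Int) (default : Int) : Int :=
  (PySem.List.pyGet? list_ index).getD default

def resize_version_tuple (version_tuple : List Int) (min_max_list : List (Int × Int)) : List Int :=
  (PySem.List.pyRange 0 (min_max_list.length : Int) 1).foldl
    (fun part_list i =>
      -- min_, max_ = min_max_list[i]; i is always in range here
      part_list ++ [list_get version_tuple i (PySem.List.pyGetD min_max_list i ((0:Int),(0:Int))).1]) []

-- ===== PORT B =====
-- mins = [min_ for min_, max_ in min_max_list]; vt[:len(mins)] + mins[len(vt):] (slices with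
-- nonnegative bounds ported exactly as take/drop)
def resize_version_tuple_alt (version_tuple : List Int) (min_max_list : List (Int × Int)) : List Int :=
  let mins := min_max_list.map Prod.fst
  version_tuple.take mins.length ++ mins.drop version_tuple.length

-- ===== PRECONDITION & SPEC =====
def Spec_resize_version_tuple (version_tuple : List Int) (min_max_list : List (Int × Int)) (out : List Int) : Prop := out = resize_version_tuple_alt version_tuple min_max_list
instance (version_tuple : List Int) (min_max_list : List (Int × Int)) (out : List Int) : Decidable (Spec_resize_version_tuple version_tuple min_max_list out) := by unfold Spec_resize_version_tuple; infer_instance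

-- ===== CLAIM (what is proved, stated in full; the proofs are below) =====
def Claim_equal_resize_version_tuple : Prop := ∀ (version_tuple : List Int) (min_max_list : List (Int × Int)), Dom_resize_version_tuple version_tuple min_max_list → Spec_resize_version_tuple version_tuple min_max_list (resize_version_tuple version_tuple min_max_list)

-- ===== LEMMAS AND PROOFS =====

-- A's fold over range(len(min_max_list)) as a map over Nat indices
theorem resize_eq_map (version_tuple : List Int) (min_max_list : List (Int × Int)) :
    resize_version_tuple version_tuple min_max_list =
      (List.range min_max_list.length).map
        (fun k => (version_tuple[k]?).getD ((min_max_list[k]?.getD ((0:Int),(0:Int))).1)) := by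
  rw [resize_version_tuple, PySem.List.foldl_append_singleton_eq_map]
  simp [list_get, PySem.List.pyRange_zero_nat, List.map_map, Function.comp]

-- the indexed map equals B's slice/concat form
theorem map_eq_alt (min_max_list : List (Int × Int)) (version_tuple : List Int) :
    (List.range min_max_list.length).map
        (fun k => (version_tuple[k]?).getD ((min_max_list[k]?.getD ((0:Int),(0:Int))).1)) =
      version_tuple.take (min_max_list.map Prod.fst).length ++
        (min_max_list.map Prod.fst).drop version_tuple.length := by
  induction min_max_list generalizing version_tuple with
  | nil => simp
  | cons p rest ih =>
    cases version_tuple with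
    | nil =>
      simpa [List.range_succ_eq_map, List.map_map, Function.comp] using ih ([] : List Int)
    | cons a vt =>
      simpa [List.range_succ_eq_map, List.map_map, Function.comp] using ih vt

-- ===== VERDICT (by name: the statement is the Claim_ definition above) =====
theorem resize_version_tuple_spec : Claim_equal_resize_version_tuple := by
  intro version_tuple min_max_list _
  unfold Spec_resize_version_tuple resize_version_tuple_alt
  rw [resize_eq_map, map_eq_alt]
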